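-- pv_equiv track=rewrite | github.com/baledanurr/DataCommProject---Group13 | client2_receiver.py | calculate_2d_parity
-- ===== SOURCE A (Python) =====
-- def calculate_2d_parity(text: str):
--     padded = text.ljust(64, "#")
--     matrix = [padded[i:i + 8] for i in range(0, 64, 8)]
--
--     row_parity = ""
--     col_parity = ""
--
--     for row in matrix:
--         ones = sum(bin(ord(c)).count("1") for c in row)
--         row_parity += "0" if ones % 2 == 0 else "1"
--
--     for col in range(8):
--         chars = [matrix[row][col] for row in range(8)]
--         ones = sum(bin(ord(c)).count("1") for c in chars)
--         col_parity += "0" if ones % 2 == 0 else "1"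
--
--     return row_parity + col_parity
-- ===== SOURCE B (Python) =====
-- def calculate_2d_parity(text: str):
--     padded = text.ljust(64, "#")
--     rows = [0] * 8
--     cols = [0] * 8
--     for c, ch in enumerate(padded[:64]):
--         p = bin(ord(ch)).count("1") % 2
--         rows[c // 8] ^= p
--         cols[c % 8] ^= p
--     return "".join(str(b) for b in rows + cols)
-- ===== Notes on version B (the rewrite author's own statement) =====
-- stated objective: alternative
-- what changed: A builds an 8x8 matrix of string slices and makes two separate passes (one per row, then a column re-gather with an inner 8-element scan); B makes a single pass over the 64 padded characters, maintaining xor-parity accumulators for all 8 rows and 8 columns at once.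
import Mathlib
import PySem

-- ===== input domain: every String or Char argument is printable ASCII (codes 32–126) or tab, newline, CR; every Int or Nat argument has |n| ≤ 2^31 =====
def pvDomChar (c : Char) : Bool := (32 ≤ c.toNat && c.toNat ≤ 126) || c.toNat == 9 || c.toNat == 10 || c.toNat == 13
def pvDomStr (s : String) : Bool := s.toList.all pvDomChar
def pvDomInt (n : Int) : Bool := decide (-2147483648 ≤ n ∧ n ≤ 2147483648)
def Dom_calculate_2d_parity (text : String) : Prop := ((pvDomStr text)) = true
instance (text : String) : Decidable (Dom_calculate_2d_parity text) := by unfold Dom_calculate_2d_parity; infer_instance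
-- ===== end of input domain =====

-- B fuses A's row pass and column re-gather into one traversal keeping xor-parity accumulators (objective: alternative single-pass decomposition).


-- ===== PORT A =====
-- text.ljust(64, "#"): PySem has no ljust; this is exact (pad on the right with '#' up to width 64).
def pvLjust (cs : List Char) : List Char := cs ++ List.replicate (64 - cs.length) '#'

-- sum(bin(ord(c)).count("1") for c in row): bin(ord(c)).count("1") is the popcount of the (nonnegative) code point.
def pvOnes (row : List Char) : Int :=
  (row.map (fun c => ((PySem.Int.bitCount (c.toNat : Int) : Int)))).sum

def calculate_2d_parity (text : String) : String :=
  let padded := pvLjust text.toList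
  let matrix := (PySem.List.pyRange 0 64 8).map (fun i => PySem.List.slice padded (some i) (some (i + 8)))
  let row_parity := matrix.foldl (fun acc row =>
    acc ++ (if PySem.Int.mod (pvOnes row) 2 = 0 then ['0'] else ['1'])) ([] : List Char)
  let col_parity := (PySem.List.pyRange 0 8 1).foldl (fun acc col =>
    let chars := (PySem.List.pyRange 0 8 1).map (fun row =>
      PySem.List.pyGetD (PySem.List.pyGetD matrix row []) col ' ')
    acc ++ (if PySem.Int.mod (pvOnes chars) 2 = 0 then ['0'] else ['1'])) ([] : List Char)
  String.ofList (row_parity ++ col_parity)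

-- ===== PORT B =====
def calculate_2d_parity_alt (text : String) : String :=
  let padded := pvLjust text.toList
  -- for c, ch in enumerate(padded[:64]): rows[c//8] ^= p; cols[c%8] ^= p
  -- (the list assignments are always in range: 0 <= c//8, c%8 < 8, so .set with .toNat is exact)
  let st := (PySem.List.enumerate (PySem.List.slice padded none (some 64))).foldl
    (fun st e =>
      let p : Int := PySem.Int.mod ((PySem.Int.bitCount (e.2.toNat : Int) : Int)) 2
      let i := PySem.Int.floordiv e.1 8
      let j := PySem.Int.mod e.1 8
      (st.1.set i.toNat (PySem.Int.bxor (PySem.List.pyGetD st.1 i 0) p),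
       st.2.set j.toNat (PySem.Int.bxor (PySem.List.pyGetD st.2 j 0) p)))
    (List.replicate 8 (0 : Int), List.replicate 8 (0 : Int))
  String.ofList (((st.1 ++ st.2).map PySem.Int.toChars).flatten)

-- ===== PRECONDITION & SPEC =====
def Spec_calculate_2d_parity (text : String) (out : String) : Prop := out = calculate_2d_parity_alt text
instance (text : String) (out : String) : Decidable (Spec_calculate_2d_parity text out) := by unfold Spec_calculate_2d_parity; infer_instance

-- ===== CLAIM (what is proved, stated in full; the proofs are below) =====
def Claim_equal_calculate_2d_parity : Prop := ∀ (text : String), Dom_calculate_2d_parity text → Spec_calculate_2d_parity text (calculate_2d_parity text)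

-- ===== LEMMAS AND PROOFS =====

def pvP (c : Char) : Int := PySem.Int.mod ((PySem.Int.bitCount (c.toNat : Int) : Int)) 2
def pvBC (c : Char) : Nat := PySem.Int.bitCount (c.toNat : Int)
def pvG1 (x : Int) : Int := PySem.Int.floordiv x 8
def pvG2 (x : Int) : Int := PySem.Int.mod x 8
def pvUpd (g : Int → Int) (a : List Int) (e : Int × Char) : List Int :=
  a.set (g e.1).toNat (PySem.Int.bxor (PySem.List.pyGetD a (g e.1) 0) (pvP e.2))
def pvSelN (g : Int → Int) (i : Nat) (l : List (Int × Char)) : Nat :=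
  (((l.filter (fun e => g e.1 == (i : Int))).map (fun e => pvBC e.2)).sum) % 2

lemma pvXor2 (a b : Nat) : (a % 2) ^^^ (b % 2) = (a + b) % 2 := by
  rcases Nat.mod_two_eq_zero_or_one a with h | h <;> rcases Nat.mod_two_eq_zero_or_one b with h' | h' <;>
    rw [h, h', Nat.add_mod, h, h'] <;> rfl

lemma pvGetDmap (a : List Nat) (n : Nat) :
    (a.map (fun x : Nat => (Nat.cast x : Int))).getD n 0 = Nat.cast (a.getD n 0) := by
  rw [List.getD_eq_getElem?_getD, List.getD_eq_getElem?_getD, List.getElem?_map]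
  cases a[n]? <;> rfl

lemma pvFoldPair (l : List (Int × Char)) (a b : List Int) :
    l.foldl (fun st e => (pvUpd pvG1 st.1 e, pvUpd pvG2 st.2 e)) (a, b)
      = (l.foldl (pvUpd pvG1) a, l.foldl (pvUpd pvG2) b) := by
  induction l generalizing a b with
  | nil => rfl
  | cons e l ih => simp only [List.foldl_cons]; exact ih _ _

lemma pvFoldArr (g : Int → Int) :
    ∀ (l : List (Int × Char)), (∀ e ∈ l, 0 ≤ g e.1 ∧ g e.1 < 8) → ∀ (a : List Nat), a.length = 8 →
      l.foldl (pvUpd g) (a.map (fun x : Nat => (Nat.cast x : Int)))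
        = (List.range 8).map (fun i => Nat.cast (a.getD i 0 ^^^ pvSelN g i l) : Nat → Int) := by
  intro l
  induction l with
  | nil =>
    intro _ a ha
    simp only [List.foldl_nil, pvSelN, List.filter_nil, List.map_nil, List.sum_nil,
      Nat.zero_mod, Nat.xor_zero]
    apply List.ext_getElem
    · simp [ha]
    · intro i h1 h2
      have hia : i < a.length := by simp at h1; omega
      simp only [List.getElem_map, List.getElem_range, List.getD_eq_getElem?_getD,
        List.getElem?_eq_getElem hia]
      rfl
  | cons e l ih =>
    intro hg a ha
    obtain ⟨hge0, hge8⟩ := hg e (List.mem_cons_self)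
    have hidx : (g e.1).toNat < 8 := by omega
    have hcast : ((g e.1).toNat : Int) = g e.1 := by omega
    have hmodc : pvP e.2 = Nat.cast (pvBC e.2 % 2) := by
      unfold pvP pvBC; exact_mod_cast PySem.Int.mod_natCast _ 2
    have key : pvUpd g (a.map (fun x : Nat => (Nat.cast x : Int))) e
        = (a.set (g e.1).toNat (a.getD (g e.1).toNat 0 ^^^ pvBC e.2 % 2)).map
            (fun x : Nat => (Nat.cast x : Int)) := by
      unfold pvUpd
      rw [← hcast, PySem.List.pyGetD_natCast, pvGetDmap, hmodc, PySem.Int.bxor_natCast,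
        List.map_set]
      simp only [Int.toNat_natCast]
    rw [List.foldl_cons, key, ih (fun e' he' => hg e' (List.mem_cons_of_mem _ he')) _ (by simp [ha])]
    apply List.map_congr_left
    intro i hi
    have hi8 : i < 8 := List.mem_range.mp hi
    by_cases hik : (g e.1).toNat = i
    · have hgei : g e.1 = (i : Int) := by omega
      have hset : (a.set (g e.1).toNat (a.getD (g e.1).toNat 0 ^^^ pvBC e.2 % 2)).getD i 0
          = a.getD i 0 ^^^ pvBC e.2 % 2 := by
        rw [hik]
        rw [List.getD_eq_getElem?_getD, List.getElem?_set_self (by omega)]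
        rfl
      rw [hset]
      unfold pvSelN
      rw [List.filter_cons_of_pos (by simp [hgei]), List.map_cons, List.sum_cons]
      congr 1
      rw [Nat.xor_assoc, pvXor2]
    · have hgei : (g e.1 == (i : Int)) = false := by
        simp only [beq_eq_false_iff_ne, ne_eq]
        intro h; exact hik (by omega)
      have hset : (a.set (g e.1).toNat (a.getD (g e.1).toNat 0 ^^^ pvBC e.2 % 2)).getD i 0
          = a.getD i 0 := by
        rw [List.getD_eq_getElem?_getD, List.getElem?_set_ne hik, ← List.getD_eq_getElem?_getD]
      rw [hset]
      unfold pvSelN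
      rw [List.filter_cons_of_neg (by simp [hgei])]

lemma pvChunkRow (C : List Char) (s : Int) (m k : Nat) (hs : s = 8 * (m : Int)) (hC : C.length = 8) :
    (PySem.List.enumerate C s).filter (fun e => pvG1 e.1 == (k : Int))
      = if m = k then PySem.List.enumerate C s else [] := by
  have hval : ∀ e ∈ PySem.List.enumerate C s, pvG1 e.1 = (m : Int) := by
    intro e he
    rw [PySem.List.mem_enumerate_iff] at he
    obtain ⟨t, ht, rfl⟩ := he
    have ht8 : t < 8 := by omega
    unfold pvG1
    rw [PySem.Int.floordiv_eq_iff_of_pos (by norm_num)]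
    constructor <;> [skip; skip] <;> push_cast <;> omega
  by_cases h : m = k
  · rw [if_pos h]
    apply List.filter_eq_self.mpr
    intro e he
    rw [hval e he, h]
    exact beq_self_eq_true _
  · rw [if_neg h]
    apply List.filter_eq_nil_iff.mpr
    intro e he
    rw [hval e he]
    simp only [beq_iff_eq, Nat.cast_inj]
    exact h

lemma pvChunkCol (C : List Char) (s : Int) (m k : Nat) (hs : s = 8 * (m : Int)) (hk : k < 8)
    (hC : C.length = 8) :
    ((PySem.List.enumerate C s).filter (fun e => pvG2 e.1 == (k : Int))).map (fun e => pvBC e.2)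
      = [pvBC (C.getD k ' ')] := by
  have hmod : ∀ c : Int, 0 ≤ c → c < 8 → pvG2 (s + c) = c := by
    intro c h1 h2
    unfold pvG2
    rw [PySem.Int.mod_eq_emod_of_pos (by norm_num)]
    omega
  have h0 : pvG2 s = 0 := by
    have := hmod 0 (by norm_num) (by norm_num); simpa using this
  rcases C with _ | ⟨d0, C⟩; · simp at hC
  rcases C with _ | ⟨d1, C⟩; · simp at hC
  rcases C with _ | ⟨d2, C⟩; · simp at hC
  rcases C with _ | ⟨d3, C⟩; · simp at hC
  rcases C with _ | ⟨d4, C⟩; · simp at hC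
  rcases C with _ | ⟨d5, C⟩; · simp at hC
  rcases C with _ | ⟨d6, C⟩; · simp at hC
  rcases C with _ | ⟨d7, C⟩; · simp at hC
  have hnil : C = [] := by
    simp only [List.length_cons] at hC; exact List.eq_nil_of_length_eq_zero (by omega)
  subst hnil
  simp only [PySem.List.enumerate_cons, PySem.List.enumerate_nil, add_assoc]
  norm_num only
  interval_cases k <;>
    simp [List.filter, h0, hmod 1 (by norm_num) (by norm_num), hmod 2 (by norm_num) (by norm_num),
      hmod 3 (by norm_num) (by norm_num), hmod 4 (by norm_num) (by norm_num),
      hmod 5 (by norm_num) (by norm_num), hmod 6 (by norm_num) (by norm_num),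
      hmod 7 (by norm_num) (by norm_num)]

def pvC (pl : List Char) (k : Nat) : List Char := (pl.drop (8 * k)).take 8

lemma pvOnesCast (C : List Char) : pvOnes C = Nat.cast ((C.map pvBC).sum) := by
  unfold pvOnes
  rw [Nat.cast_list_sum, List.map_map]
  rfl

lemma pvCell (S : Nat) : PySem.Int.toChars ((Nat.cast (S % 2)) : Int)
    = if PySem.Int.mod ((Nat.cast S : Int)) 2 = 0 then ['0'] else ['1'] := by
  have h2 : PySem.Int.mod ((Nat.cast S : Int)) 2 = Nat.cast (S % 2) := by
    exact_mod_cast PySem.Int.mod_natCast S 2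
  rw [h2]
  rcases Nat.mod_two_eq_zero_or_one S with h | h <;> rw [h]
  · norm_num; rfl
  · norm_num; rfl

lemma pvSplit (pl : List Char) :
    pl.take 64 = pvC pl 0 ++ (pvC pl 1 ++ (pvC pl 2 ++ (pvC pl 3 ++
      (pvC pl 4 ++ (pvC pl 5 ++ (pvC pl 6 ++ pvC pl 7)))))) := by
  unfold pvC
  norm_num
  rw [show (64:Nat) = 8+(8+(8+(8+(8+(8+(8+8)))))) from rfl]
  rw [List.take_add, List.take_add, List.take_add, List.take_add, List.take_add,
    List.take_add, List.take_add]
  simp [List.drop_drop]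

lemma pvClen (pl : List Char) (h64 : 64 ≤ pl.length) (k : Nat) (hk : k < 8) :
    (pvC pl k).length = 8 := by
  unfold pvC
  rw [List.length_take, List.length_drop]
  omega

lemma pvMapSnd (C : List Char) (s : Int) :
    (PySem.List.enumerate C s).map (fun e => pvBC e.2) = C.map pvBC := by
  rw [show (fun e : Int × Char => pvBC e.2) = pvBC ∘ (fun e : Int × Char => e.2) from rfl,
    ← List.map_map, PySem.List.map_snd_enumerate]

set_option maxHeartbeats 1000000 in
lemma pvMain (pl : List Char) (h64 : 64 ≤ pl.length) :
    String.ofList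
      (List.foldl (fun acc row => acc ++ if PySem.Int.mod (pvOnes row) 2 = 0 then ['0'] else ['1']) []
          (List.map (fun i => PySem.List.slice pl (some i) (some (i + 8))) (PySem.List.pyRange 0 64 8)) ++
        List.foldl
          (fun acc col =>
            acc ++ if PySem.Int.mod (pvOnes (List.map (fun row =>
                            PySem.List.pyGetD (PySem.List.pyGetD
                                (List.map (fun i => PySem.List.slice pl (some i) (some (i + 8)))
                                  (PySem.List.pyRange 0 64 8)) row []) col ' ')
                          (PySem.List.pyRange 0 8 1))) 2 = 0 then ['0'] else ['1'])
          [] (PySem.List.pyRange 0 8 1)) =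
    String.ofList
      (List.map PySem.Int.toChars
          ((List.foldl (fun st e => (pvUpd pvG1 st.1 e, pvUpd pvG2 st.2 e))
                ((List.replicate 8 (0:Int)), (List.replicate 8 (0:Int)))
                (PySem.List.enumerate (PySem.List.slice pl none (some 64)))).1 ++
            (List.foldl (fun st e => (pvUpd pvG1 st.1 e, pvUpd pvG2 st.2 e))
                ((List.replicate 8 (0:Int)), (List.replicate 8 (0:Int)))
                (PySem.List.enumerate (PySem.List.slice pl none (some 64)))).2)).flatten := by
  -- B side: slice → take → chunk split
  have hsl : PySem.List.slice pl none (some 64) = pl.take 64 :=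
    (PySem.List.slice_to pl (by norm_num)).trans rfl
  rw [hsl, pvSplit pl]
  rw [PySem.List.enumerate_append, PySem.List.enumerate_append, PySem.List.enumerate_append,
    PySem.List.enumerate_append, PySem.List.enumerate_append, PySem.List.enumerate_append,
    PySem.List.enumerate_append]
  rw [pvClen pl h64 0 (by norm_num), pvClen pl h64 1 (by norm_num), pvClen pl h64 2 (by norm_num),
    pvClen pl h64 3 (by norm_num), pvClen pl h64 4 (by norm_num), pvClen pl h64 5 (by norm_num),
    pvClen pl h64 6 (by norm_num)]
  norm_num only
  have hCle : ∀ k : Nat, (pvC pl k).length ≤ 8 := by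
    intro k; unfold pvC; exact List.length_take_le ..
  have hmem : ∀ e ∈ (PySem.List.enumerate (pvC pl 0) 0 ++ (PySem.List.enumerate (pvC pl 1) 8 ++ (PySem.List.enumerate (pvC pl 2) 16 ++ (PySem.List.enumerate (pvC pl 3) 24 ++ (PySem.List.enumerate (pvC pl 4) 32 ++ (PySem.List.enumerate (pvC pl 5) 40 ++ (PySem.List.enumerate (pvC pl 6) 48 ++ PySem.List.enumerate (pvC pl 7) 56))))))), 0 ≤ e.1 ∧ e.1 < 64 := by
    intro e he
    simp only [List.mem_append] at he
    rcases he with he | he | he | he | he | he | he | he <;>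
      (rw [PySem.List.mem_enumerate_iff] at he
       obtain ⟨t, ht, rfl⟩ := he
       have ht8 : t < 8 := lt_of_lt_of_le ht (hCle _)
       constructor <;> simp <;> omega)
  have hg1 : ∀ e ∈ (PySem.List.enumerate (pvC pl 0) 0 ++ (PySem.List.enumerate (pvC pl 1) 8 ++ (PySem.List.enumerate (pvC pl 2) 16 ++ (PySem.List.enumerate (pvC pl 3) 24 ++ (PySem.List.enumerate (pvC pl 4) 32 ++ (PySem.List.enumerate (pvC pl 5) 40 ++ (PySem.List.enumerate (pvC pl 6) 48 ++ PySem.List.enumerate (pvC pl 7) 56))))))), 0 ≤ pvG1 e.1 ∧ pvG1 e.1 < 8 := by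
    intro e he
    obtain ⟨h1, h2⟩ := hmem e he
    unfold pvG1
    rw [PySem.Int.floordiv_eq_ediv_of_pos (by norm_num)]
    omega
  have hg2 : ∀ e ∈ (PySem.List.enumerate (pvC pl 0) 0 ++ (PySem.List.enumerate (pvC pl 1) 8 ++ (PySem.List.enumerate (pvC pl 2) 16 ++ (PySem.List.enumerate (pvC pl 3) 24 ++ (PySem.List.enumerate (pvC pl 4) 32 ++ (PySem.List.enumerate (pvC pl 5) 40 ++ (PySem.List.enumerate (pvC pl 6) 48 ++ PySem.List.enumerate (pvC pl 7) 56))))))), 0 ≤ pvG2 e.1 ∧ pvG2 e.1 < 8 := by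
    intro e he
    obtain ⟨h1, h2⟩ := hmem e he
    unfold pvG2
    rw [PySem.Int.mod_eq_emod_of_pos (by norm_num)]
    omega
  rw [pvFoldPair]
  rw [show (List.replicate 8 (0:Int)) = (List.replicate 8 (0:Nat)).map (fun x : Nat => (Nat.cast x : Int)) from by simp]
  rw [pvFoldArr pvG1 _ hg1 _ (by simp), pvFoldArr pvG2 _ hg2 _ (by simp)]
  dsimp only
  have hgd : ∀ i : Nat, (List.replicate 8 (0:Nat)).getD i 0 = 0 := by
    intro i
    rcases Nat.lt_or_ge i 8 with h | h
    · rw [List.getD_eq_getElem?_getD, List.getElem?_replicate]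
      simp [h]
    · rw [List.getD_eq_getElem?_getD, List.getElem?_replicate]
      simp [Nat.not_lt_of_ge h]
  simp only [hgd, Nat.zero_xor]
  have hrow0 : pvSelN pvG1 0 (PySem.List.enumerate (pvC pl 0) 0 ++ (PySem.List.enumerate (pvC pl 1) 8 ++ (PySem.List.enumerate (pvC pl 2) 16 ++ (PySem.List.enumerate (pvC pl 3) 24 ++ (PySem.List.enumerate (pvC pl 4) 32 ++ (PySem.List.enumerate (pvC pl 5) 40 ++ (PySem.List.enumerate (pvC pl 6) 48 ++ PySem.List.enumerate (pvC pl 7) 56))))))) = ((pvC pl 0).map pvBC).sum % 2 := by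
    unfold pvSelN
    simp only [List.filter_append]
    rw [pvChunkRow (pvC pl 0) 0 0 0 (by norm_num) (pvClen pl h64 0 (by norm_num)), pvChunkRow (pvC pl 1) 8 1 0 (by norm_num) (pvClen pl h64 1 (by norm_num)), pvChunkRow (pvC pl 2) 16 2 0 (by norm_num) (pvClen pl h64 2 (by norm_num)), pvChunkRow (pvC pl 3) 24 3 0 (by norm_num) (pvClen pl h64 3 (by norm_num)), pvChunkRow (pvC pl 4) 32 4 0 (by norm_num) (pvClen pl h64 4 (by norm_num)), pvChunkRow (pvC pl 5) 40 5 0 (by norm_num) (pvClen pl h64 5 (by norm_num)), pvChunkRow (pvC pl 6) 48 6 0 (by norm_num) (pvClen pl h64 6 (by norm_num)), pvChunkRow (pvC pl 7) 56 7 0 (by norm_num) (pvClen pl h64 7 (by norm_num))]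
    simp [pvMapSnd]
  have hrow1 : pvSelN pvG1 1 (PySem.List.enumerate (pvC pl 0) 0 ++ (PySem.List.enumerate (pvC pl 1) 8 ++ (PySem.List.enumerate (pvC pl 2) 16 ++ (PySem.List.enumerate (pvC pl 3) 24 ++ (PySem.List.enumerate (pvC pl 4) 32 ++ (PySem.List.enumerate (pvC pl 5) 40 ++ (PySem.List.enumerate (pvC pl 6) 48 ++ PySem.List.enumerate (pvC pl 7) 56))))))) = ((pvC pl 1).map pvBC).sum % 2 := by
    unfold pvSelN
    simp only [List.filter_append]
    rw [pvChunkRow (pvC pl 0) 0 0 1 (by norm_num) (pvClen pl h64 0 (by norm_num)), pvChunkRow (pvC pl 1) 8 1 1 (by norm_num) (pvClen pl h64 1 (by norm_num)), pvChunkRow (pvC pl 2) 16 2 1 (by norm_num) (pvClen pl h64 2 (by norm_num)), pvChunkRow (pvC pl 3) 24 3 1 (by norm_num) (pvClen pl h64 3 (by norm_num)), pvChunkRow (pvC pl 4) 32 4 1 (by norm_num) (pvClen pl h64 4 (by norm_num)), pvChunkRow (pvC pl 5) 40 5 1 (by norm_num) (pvClen pl h64 5 (by norm_num)), pvChunkRow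 (pvC pl 6) 48 6 1 (by norm_num) (pvClen pl h64 6 (by norm_num)), pvChunkRow (pvC pl 7) 56 7 1 (by norm_num) (pvClen pl h64 7 (by norm_num))]
    simp [pvMapSnd]
  have hrow2 : pvSelN pvG1 2 (PySem.List.enumerate (pvC pl 0) 0 ++ (PySem.List.enumerate (pvC pl 1) 8 ++ (PySem.List.enumerate (pvC pl 2) 16 ++ (PySem.List.enumerate (pvC pl 3) 24 ++ (PySem.List.enumerate (pvC pl 4) 32 ++ (PySem.List.enumerate (pvC pl 5) 40 ++ (PySem.List.enumerate (pvC pl 6) 48 ++ PySem.List.enumerate (pvC pl 7) 56))))))) = ((pvC pl 2).map pvBC).sum % 2 := by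
    unfold pvSelN
    simp only [List.filter_append]
    rw [pvChunkRow (pvC pl 0) 0 0 2 (by norm_num) (pvClen pl h64 0 (by norm_num)), pvChunkRow (pvC pl 1) 8 1 2 (by norm_num) (pvClen pl h64 1 (by norm_num)), pvChunkRow (pvC pl 2) 16 2 2 (by norm_num) (pvClen pl h64 2 (by norm_num)), pvChunkRow (pvC pl 3) 24 3 2 (by norm_num) (pvClen pl h64 3 (by norm_num)), pvChunkRow (pvC pl 4) 32 4 2 (by norm_num) (pvClen pl h64 4 (by norm_num)), pvChunkRow (pvC pl 5) 40 5 2 (by norm_num) (pvClen pl h64 5 (by norm_num)), pvChunkRow (pvC pl 6) 48 6 2 (by norm_num) (pvClen pl h64 6 (by norm_num)), pvChunkRow (pvC pl 7) 56 7 2 (by norm_num) (pvClen pl h64 7 (by norm_num))]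
    simp [pvMapSnd]
  have hrow3 : pvSelN pvG1 3 (PySem.List.enumerate (pvC pl 0) 0 ++ (PySem.List.enumerate (pvC pl 1) 8 ++ (PySem.List.enumerate (pvC pl 2) 16 ++ (PySem.List.enumerate (pvC pl 3) 24 ++ (PySem.List.enumerate (pvC pl 4) 32 ++ (PySem.List.enumerate (pvC pl 5) 40 ++ (PySem.List.enumerate (pvC pl 6) 48 ++ PySem.List.enumerate (pvC pl 7) 56))))))) = ((pvC pl 3).map pvBC).sum % 2 := by
    unfold pvSelN
    simp only [List.filter_append]
    rw [pvChunkRow (pvC pl 0) 0 0 3 (by norm_num) (pvClen pl h64 0 (by norm_num)), pvChunkRow (pvC pl 1) 8 1 3 (by norm_num) (pvClen pl h64 1 (by norm_num)), pvChunkRow (pvC pl 2) 16 2 3 (by norm_num) (pvClen pl h64 2 (by norm_num)), pvChunkRow (pvC pl 3) 24 3 3 (by norm_num) (pvClen pl h64 3 (by norm_num)), pvChunkRow (pvC pl 4) 32 4 3 (by norm_num) (pvClen pl h64 4 (by norm_num)), pvChunkRow (pvC pl 5) 40 5 3 (by norm_num) (pvClen pl h64 5 (by norm_num)), pvChunkRow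 (pvC pl 6) 48 6 3 (by norm_num) (pvClen pl h64 6 (by norm_num)), pvChunkRow (pvC pl 7) 56 7 3 (by norm_num) (pvClen pl h64 7 (by norm_num))]
    simp [pvMapSnd]
  have hrow4 : pvSelN pvG1 4 (PySem.List.enumerate (pvC pl 0) 0 ++ (PySem.List.enumerate (pvC pl 1) 8 ++ (PySem.List.enumerate (pvC pl 2) 16 ++ (PySem.List.enumerate (pvC pl 3) 24 ++ (PySem.List.enumerate (pvC pl 4) 32 ++ (PySem.List.enumerate (pvC pl 5) 40 ++ (PySem.List.enumerate (pvC pl 6) 48 ++ PySem.List.enumerate (pvC pl 7) 56))))))) = ((pvC pl 4).map pvBC).sum % 2 := by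
    unfold pvSelN
    simp only [List.filter_append]
    rw [pvChunkRow (pvC pl 0) 0 0 4 (by norm_num) (pvClen pl h64 0 (by norm_num)), pvChunkRow (pvC pl 1) 8 1 4 (by norm_num) (pvClen pl h64 1 (by norm_num)), pvChunkRow (pvC pl 2) 16 2 4 (by norm_num) (pvClen pl h64 2 (by norm_num)), pvChunkRow (pvC pl 3) 24 3 4 (by norm_num) (pvClen pl h64 3 (by norm_num)), pvChunkRow (pvC pl 4) 32 4 4 (by norm_num) (pvClen pl h64 4 (by norm_num)), pvChunkRow (pvC pl 5) 40 5 4 (by norm_num) (pvClen pl h64 5 (by norm_num)), pvChunkRow (pvC pl 6) 48 6 4 (by norm_num) (pvClen pl h64 6 (by norm_num)), pvChunkRow (pvC pl 7) 56 7 4 (by norm_num) (pvClen pl h64 7 (by norm_num))]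
    simp [pvMapSnd]
  have hrow5 : pvSelN pvG1 5 (PySem.List.enumerate (pvC pl 0) 0 ++ (PySem.List.enumerate (pvC pl 1) 8 ++ (PySem.List.enumerate (pvC pl 2) 16 ++ (PySem.List.enumerate (pvC pl 3) 24 ++ (PySem.List.enumerate (pvC pl 4) 32 ++ (PySem.List.enumerate (pvC pl 5) 40 ++ (PySem.List.enumerate (pvC pl 6) 48 ++ PySem.List.enumerate (pvC pl 7) 56))))))) = ((pvC pl 5).map pvBC).sum % 2 := by
    unfold pvSelN
    simp only [List.filter_append]
    rw [pvChunkRow (pvC pl 0) 0 0 5 (by norm_num) (pvClen pl h64 0 (by norm_num)), pvChunkRow (pvC pl 1) 8 1 5 (by norm_num) (pvClen pl h64 1 (by norm_num)), pvChunkRow (pvC pl 2) 16 2 5 (by norm_num) (pvClen pl h64 2 (by norm_num)), pvChunkRow (pvC pl 3) 24 3 5 (by norm_num) (pvClen pl h64 3 (by norm_num)), pvChunkRow (pvC pl 4) 32 4 5 (by norm_num) (pvClen pl h64 4 (by norm_num)), pvChunkRow (pvC pl 5) 40 5 5 (by norm_num) (pvClen pl h64 5 (by norm_num)), pvChunkRow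 (pvC pl 6) 48 6 5 (by norm_num) (pvClen pl h64 6 (by norm_num)), pvChunkRow (pvC pl 7) 56 7 5 (by norm_num) (pvClen pl h64 7 (by norm_num))]
    simp [pvMapSnd]
  have hrow6 : pvSelN pvG1 6 (PySem.List.enumerate (pvC pl 0) 0 ++ (PySem.List.enumerate (pvC pl 1) 8 ++ (PySem.List.enumerate (pvC pl 2) 16 ++ (PySem.List.enumerate (pvC pl 3) 24 ++ (PySem.List.enumerate (pvC pl 4) 32 ++ (PySem.List.enumerate (pvC pl 5) 40 ++ (PySem.List.enumerate (pvC pl 6) 48 ++ PySem.List.enumerate (pvC pl 7) 56))))))) = ((pvC pl 6).map pvBC).sum % 2 := by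
    unfold pvSelN
    simp only [List.filter_append]
    rw [pvChunkRow (pvC pl 0) 0 0 6 (by norm_num) (pvClen pl h64 0 (by norm_num)), pvChunkRow (pvC pl 1) 8 1 6 (by norm_num) (pvClen pl h64 1 (by norm_num)), pvChunkRow (pvC pl 2) 16 2 6 (by norm_num) (pvClen pl h64 2 (by norm_num)), pvChunkRow (pvC pl 3) 24 3 6 (by norm_num) (pvClen pl h64 3 (by norm_num)), pvChunkRow (pvC pl 4) 32 4 6 (by norm_num) (pvClen pl h64 4 (by norm_num)), pvChunkRow (pvC pl 5) 40 5 6 (by norm_num) (pvClen pl h64 5 (by norm_num)), pvChunkRow (pvC pl 6) 48 6 6 (by norm_num) (pvClen pl h64 6 (by norm_num)), pvChunkRow (pvC pl 7) 56 7 6 (by norm_num) (pvClen pl h64 7 (by norm_num))]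
    simp [pvMapSnd]
  have hrow7 : pvSelN pvG1 7 (PySem.List.enumerate (pvC pl 0) 0 ++ (PySem.List.enumerate (pvC pl 1) 8 ++ (PySem.List.enumerate (pvC pl 2) 16 ++ (PySem.List.enumerate (pvC pl 3) 24 ++ (PySem.List.enumerate (pvC pl 4) 32 ++ (PySem.List.enumerate (pvC pl 5) 40 ++ (PySem.List.enumerate (pvC pl 6) 48 ++ PySem.List.enumerate (pvC pl 7) 56))))))) = ((pvC pl 7).map pvBC).sum % 2 := by
    unfold pvSelN
    simp only [List.filter_append]
    rw [pvChunkRow (pvC pl 0) 0 0 7 (by norm_num) (pvClen pl h64 0 (by norm_num)), pvChunkRow (pvC pl 1) 8 1 7 (by norm_num) (pvClen pl h64 1 (by norm_num)), pvChunkRow (pvC pl 2) 16 2 7 (by norm_num) (pvClen pl h64 2 (by norm_num)), pvChunkRow (pvC pl 3) 24 3 7 (by norm_num) (pvClen pl h64 3 (by norm_num)), pvChunkRow (pvC pl 4) 32 4 7 (by norm_num) (pvClen pl h64 4 (by norm_num)), pvChunkRow (pvC pl 5) 40 5 7 (by norm_num) (pvClen pl h64 5 (by norm_num)), pvChunkRow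 (pvC pl 6) 48 6 7 (by norm_num) (pvClen pl h64 6 (by norm_num)), pvChunkRow (pvC pl 7) 56 7 7 (by norm_num) (pvClen pl h64 7 (by norm_num))]
    simp [pvMapSnd]
  have hcol0 : pvSelN pvG2 0 (PySem.List.enumerate (pvC pl 0) 0 ++ (PySem.List.enumerate (pvC pl 1) 8 ++ (PySem.List.enumerate (pvC pl 2) 16 ++ (PySem.List.enumerate (pvC pl 3) 24 ++ (PySem.List.enumerate (pvC pl 4) 32 ++ (PySem.List.enumerate (pvC pl 5) 40 ++ (PySem.List.enumerate (pvC pl 6) 48 ++ PySem.List.enumerate (pvC pl 7) 56))))))) = (([(pvC pl 0).getD 0 ' ', (pvC pl 1).getD 0 ' ', (pvC pl 2).getD 0 ' ', (pvC pl 3).getD 0 ' ', (pvC pl 4).getD 0 ' ', (pvC pl 5).getD 0 ' ', (pvC pl 6).getD 0 ' ', (pvC pl 7).getD 0 ' ']).map pvBC).sum % 2 := by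
    unfold pvSelN
    simp only [List.filter_append, List.map_append]
    rw [pvChunkCol (pvC pl 0) 0 0 0 (by norm_num) (by norm_num) (pvClen pl h64 0 (by norm_num)), pvChunkCol (pvC pl 1) 8 1 0 (by norm_num) (by norm_num) (pvClen pl h64 1 (by norm_num)), pvChunkCol (pvC pl 2) 16 2 0 (by norm_num) (by norm_num) (pvClen pl h64 2 (by norm_num)), pvChunkCol (pvC pl 3) 24 3 0 (by norm_num) (by norm_num) (pvClen pl h64 3 (by norm_num)), pvChunkCol (pvC pl 4) 32 4 0 (by norm_num) (by norm_num) (pvClen pl h64 4 (by norm_num)), pvChunkCol (pvC pl 5) 40 5 0 (by norm_num) (by norm_num) (pvClen pl h64 5 (by norm_num)), pvChunkCol (pvC pl 6) 48 6 0 (by norm_num) (by norm_num) (pvClen pl h64 6 (by norm_num)), pvChunkCol (pvC pl 7) 56 7 0 (by norm_num) (by norm_num) (pvClen pl h64 7 (by norm_num))]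
    simp
  have hcol1 : pvSelN pvG2 1 (PySem.List.enumerate (pvC pl 0) 0 ++ (PySem.List.enumerate (pvC pl 1) 8 ++ (PySem.List.enumerate (pvC pl 2) 16 ++ (PySem.List.enumerate (pvC pl 3) 24 ++ (PySem.List.enumerate (pvC pl 4) 32 ++ (PySem.List.enumerate (pvC pl 5) 40 ++ (PySem.List.enumerate (pvC pl 6) 48 ++ PySem.List.enumerate (pvC pl 7) 56))))))) = (([(pvC pl 0).getD 1 ' ', (pvC pl 1).getD 1 ' ', (pvC pl 2).getD 1 ' ', (pvC pl 3).getD 1 ' ', (pvC pl 4).getD 1 ' ', (pvC pl 5).getD 1 ' ', (pvC pl 6).getD 1 ' ', (pvC pl 7).getD 1 ' ']).map pvBC).sum % 2 := by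
    unfold pvSelN
    simp only [List.filter_append, List.map_append]
    rw [pvChunkCol (pvC pl 0) 0 0 1 (by norm_num) (by norm_num) (pvClen pl h64 0 (by norm_num)), pvChunkCol (pvC pl 1) 8 1 1 (by norm_num) (by norm_num) (pvClen pl h64 1 (by norm_num)), pvChunkCol (pvC pl 2) 16 2 1 (by norm_num) (by norm_num) (pvClen pl h64 2 (by norm_num)), pvChunkCol (pvC pl 3) 24 3 1 (by norm_num) (by norm_num) (pvClen pl h64 3 (by norm_num)), pvChunkCol (pvC pl 4) 32 4 1 (by norm_num) (by norm_num) (pvClen pl h64 4 (by norm_num)), pvChunkCol (pvC pl 5) 40 5 1 (by norm_num) (by norm_num) (pvClen pl h64 5 (by norm_num)), pvChunkCol (pvC pl 6) 48 6 1 (by norm_num) (by norm_num) (pvClen pl h64 6 (by norm_num)), pvChunkCol (pvC pl 7) 56 7 1 (by norm_num) (by norm_num) (pvClen pl h64 7 (by norm_num))]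
    simp
  have hcol2 : pvSelN pvG2 2 (PySem.List.enumerate (pvC pl 0) 0 ++ (PySem.List.enumerate (pvC pl 1) 8 ++ (PySem.List.enumerate (pvC pl 2) 16 ++ (PySem.List.enumerate (pvC pl 3) 24 ++ (PySem.List.enumerate (pvC pl 4) 32 ++ (PySem.List.enumerate (pvC pl 5) 40 ++ (PySem.List.enumerate (pvC pl 6) 48 ++ PySem.List.enumerate (pvC pl 7) 56))))))) = (([(pvC pl 0).getD 2 ' ', (pvC pl 1).getD 2 ' ', (pvC pl 2).getD 2 ' ', (pvC pl 3).getD 2 ' ', (pvC pl 4).getD 2 ' ', (pvC pl 5).getD 2 ' ', (pvC pl 6).getD 2 ' ', (pvC pl 7).getD 2 ' ']).map pvBC).sum % 2 := by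
    unfold pvSelN
    simp only [List.filter_append, List.map_append]
    rw [pvChunkCol (pvC pl 0) 0 0 2 (by norm_num) (by norm_num) (pvClen pl h64 0 (by norm_num)), pvChunkCol (pvC pl 1) 8 1 2 (by norm_num) (by norm_num) (pvClen pl h64 1 (by norm_num)), pvChunkCol (pvC pl 2) 16 2 2 (by norm_num) (by norm_num) (pvClen pl h64 2 (by norm_num)), pvChunkCol (pvC pl 3) 24 3 2 (by norm_num) (by norm_num) (pvClen pl h64 3 (by norm_num)), pvChunkCol (pvC pl 4) 32 4 2 (by norm_num) (by norm_num) (pvClen pl h64 4 (by norm_num)), pvChunkCol (pvC pl 5) 40 5 2 (by norm_num) (by norm_num) (pvClen pl h64 5 (by norm_num)), pvChunkCol (pvC pl 6) 48 6 2 (by norm_num) (by norm_num) (pvClen pl h64 6 (by norm_num)), pvChunkCol (pvC pl 7) 56 7 2 (by norm_num) (by norm_num) (pvClen pl h64 7 (by norm_num))]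
    simp
  have hcol3 : pvSelN pvG2 3 (PySem.List.enumerate (pvC pl 0) 0 ++ (PySem.List.enumerate (pvC pl 1) 8 ++ (PySem.List.enumerate (pvC pl 2) 16 ++ (PySem.List.enumerate (pvC pl 3) 24 ++ (PySem.List.enumerate (pvC pl 4) 32 ++ (PySem.List.enumerate (pvC pl 5) 40 ++ (PySem.List.enumerate (pvC pl 6) 48 ++ PySem.List.enumerate (pvC pl 7) 56))))))) = (([(pvC pl 0).getD 3 ' ', (pvC pl 1).getD 3 ' ', (pvC pl 2).getD 3 ' ', (pvC pl 3).getD 3 ' ', (pvC pl 4).getD 3 ' ', (pvC pl 5).getD 3 ' ', (pvC pl 6).getD 3 ' ', (pvC pl 7).getD 3 ' ']).map pvBC).sum % 2 := by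
    unfold pvSelN
    simp only [List.filter_append, List.map_append]
    rw [pvChunkCol (pvC pl 0) 0 0 3 (by norm_num) (by norm_num) (pvClen pl h64 0 (by norm_num)), pvChunkCol (pvC pl 1) 8 1 3 (by norm_num) (by norm_num) (pvClen pl h64 1 (by norm_num)), pvChunkCol (pvC pl 2) 16 2 3 (by norm_num) (by norm_num) (pvClen pl h64 2 (by norm_num)), pvChunkCol (pvC pl 3) 24 3 3 (by norm_num) (by norm_num) (pvClen pl h64 3 (by norm_num)), pvChunkCol (pvC pl 4) 32 4 3 (by norm_num) (by norm_num) (pvClen pl h64 4 (by norm_num)), pvChunkCol (pvC pl 5) 40 5 3 (by norm_num) (by norm_num) (pvClen pl h64 5 (by norm_num)), pvChunkCol (pvC pl 6) 48 6 3 (by norm_num) (by norm_num) (pvClen pl h64 6 (by norm_num)), pvChunkCol (pvC pl 7) 56 7 3 (by norm_num) (by norm_num) (pvClen pl h64 7 (by norm_num))]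
    simp
  have hcol4 : pvSelN pvG2 4 (PySem.List.enumerate (pvC pl 0) 0 ++ (PySem.List.enumerate (pvC pl 1) 8 ++ (PySem.List.enumerate (pvC pl 2) 16 ++ (PySem.List.enumerate (pvC pl 3) 24 ++ (PySem.List.enumerate (pvC pl 4) 32 ++ (PySem.List.enumerate (pvC pl 5) 40 ++ (PySem.List.enumerate (pvC pl 6) 48 ++ PySem.List.enumerate (pvC pl 7) 56))))))) = (([(pvC pl 0).getD 4 ' ', (pvC pl 1).getD 4 ' ', (pvC pl 2).getD 4 ' ', (pvC pl 3).getD 4 ' ', (pvC pl 4).getD 4 ' ', (pvC pl 5).getD 4 ' ', (pvC pl 6).getD 4 ' ', (pvC pl 7).getD 4 ' ']).map pvBC).sum % 2 := by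
    unfold pvSelN
    simp only [List.filter_append, List.map_append]
    rw [pvChunkCol (pvC pl 0) 0 0 4 (by norm_num) (by norm_num) (pvClen pl h64 0 (by norm_num)), pvChunkCol (pvC pl 1) 8 1 4 (by norm_num) (by norm_num) (pvClen pl h64 1 (by norm_num)), pvChunkCol (pvC pl 2) 16 2 4 (by norm_num) (by norm_num) (pvClen pl h64 2 (by norm_num)), pvChunkCol (pvC pl 3) 24 3 4 (by norm_num) (by norm_num) (pvClen pl h64 3 (by norm_num)), pvChunkCol (pvC pl 4) 32 4 4 (by norm_num) (by norm_num) (pvClen pl h64 4 (by norm_num)), pvChunkCol (pvC pl 5) 40 5 4 (by norm_num) (by norm_num) (pvClen pl h64 5 (by norm_num)), pvChunkCol (pvC pl 6) 48 6 4 (by norm_num) (by norm_num) (pvClen pl h64 6 (by norm_num)), pvChunkCol (pvC pl 7) 56 7 4 (by norm_num) (by norm_num) (pvClen pl h64 7 (by norm_num))]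
    simp
  have hcol5 : pvSelN pvG2 5 (PySem.List.enumerate (pvC pl 0) 0 ++ (PySem.List.enumerate (pvC pl 1) 8 ++ (PySem.List.enumerate (pvC pl 2) 16 ++ (PySem.List.enumerate (pvC pl 3) 24 ++ (PySem.List.enumerate (pvC pl 4) 32 ++ (PySem.List.enumerate (pvC pl 5) 40 ++ (PySem.List.enumerate (pvC pl 6) 48 ++ PySem.List.enumerate (pvC pl 7) 56))))))) = (([(pvC pl 0).getD 5 ' ', (pvC pl 1).getD 5 ' ', (pvC pl 2).getD 5 ' ', (pvC pl 3).getD 5 ' ', (pvC pl 4).getD 5 ' ', (pvC pl 5).getD 5 ' ', (pvC pl 6).getD 5 ' ', (pvC pl 7).getD 5 ' ']).map pvBC).sum % 2 := by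
    unfold pvSelN
    simp only [List.filter_append, List.map_append]
    rw [pvChunkCol (pvC pl 0) 0 0 5 (by norm_num) (by norm_num) (pvClen pl h64 0 (by norm_num)), pvChunkCol (pvC pl 1) 8 1 5 (by norm_num) (by norm_num) (pvClen pl h64 1 (by norm_num)), pvChunkCol (pvC pl 2) 16 2 5 (by norm_num) (by norm_num) (pvClen pl h64 2 (by norm_num)), pvChunkCol (pvC pl 3) 24 3 5 (by norm_num) (by norm_num) (pvClen pl h64 3 (by norm_num)), pvChunkCol (pvC pl 4) 32 4 5 (by norm_num) (by norm_num) (pvClen pl h64 4 (by norm_num)), pvChunkCol (pvC pl 5) 40 5 5 (by norm_num) (by norm_num) (pvClen pl h64 5 (by norm_num)), pvChunkCol (pvC pl 6) 48 6 5 (by norm_num) (by norm_num) (pvClen pl h64 6 (by norm_num)), pvChunkCol (pvC pl 7) 56 7 5 (by norm_num) (by norm_num) (pvClen pl h64 7 (by norm_num))]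
    simp
  have hcol6 : pvSelN pvG2 6 (PySem.List.enumerate (pvC pl 0) 0 ++ (PySem.List.enumerate (pvC pl 1) 8 ++ (PySem.List.enumerate (pvC pl 2) 16 ++ (PySem.List.enumerate (pvC pl 3) 24 ++ (PySem.List.enumerate (pvC pl 4) 32 ++ (PySem.List.enumerate (pvC pl 5) 40 ++ (PySem.List.enumerate (pvC pl 6) 48 ++ PySem.List.enumerate (pvC pl 7) 56))))))) = (([(pvC pl 0).getD 6 ' ', (pvC pl 1).getD 6 ' ', (pvC pl 2).getD 6 ' ', (pvC pl 3).getD 6 ' ', (pvC pl 4).getD 6 ' ', (pvC pl 5).getD 6 ' ', (pvC pl 6).getD 6 ' ', (pvC pl 7).getD 6 ' ']).map pvBC).sum % 2 := by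
    unfold pvSelN
    simp only [List.filter_append, List.map_append]
    rw [pvChunkCol (pvC pl 0) 0 0 6 (by norm_num) (by norm_num) (pvClen pl h64 0 (by norm_num)), pvChunkCol (pvC pl 1) 8 1 6 (by norm_num) (by norm_num) (pvClen pl h64 1 (by norm_num)), pvChunkCol (pvC pl 2) 16 2 6 (by norm_num) (by norm_num) (pvClen pl h64 2 (by norm_num)), pvChunkCol (pvC pl 3) 24 3 6 (by norm_num) (by norm_num) (pvClen pl h64 3 (by norm_num)), pvChunkCol (pvC pl 4) 32 4 6 (by norm_num) (by norm_num) (pvClen pl h64 4 (by norm_num)), pvChunkCol (pvC pl 5) 40 5 6 (by norm_num) (by norm_num) (pvClen pl h64 5 (by norm_num)), pvChunkCol (pvC pl 6) 48 6 6 (by norm_num) (by norm_num) (pvClen pl h64 6 (by norm_num)), pvChunkCol (pvC pl 7) 56 7 6 (by norm_num) (by norm_num) (pvClen pl h64 7 (by norm_num))]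
    simp
  have hcol7 : pvSelN pvG2 7 (PySem.List.enumerate (pvC pl 0) 0 ++ (PySem.List.enumerate (pvC pl 1) 8 ++ (PySem.List.enumerate (pvC pl 2) 16 ++ (PySem.List.enumerate (pvC pl 3) 24 ++ (PySem.List.enumerate (pvC pl 4) 32 ++ (PySem.List.enumerate (pvC pl 5) 40 ++ (PySem.List.enumerate (pvC pl 6) 48 ++ PySem.List.enumerate (pvC pl 7) 56))))))) = (([(pvC pl 0).getD 7 ' ', (pvC pl 1).getD 7 ' ', (pvC pl 2).getD 7 ' ', (pvC pl 3).getD 7 ' ', (pvC pl 4).getD 7 ' ', (pvC pl 5).getD 7 ' ', (pvC pl 6).getD 7 ' ', (pvC pl 7).getD 7 ' ']).map pvBC).sum % 2 := by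
    unfold pvSelN
    simp only [List.filter_append, List.map_append]
    rw [pvChunkCol (pvC pl 0) 0 0 7 (by norm_num) (by norm_num) (pvClen pl h64 0 (by norm_num)), pvChunkCol (pvC pl 1) 8 1 7 (by norm_num) (by norm_num) (pvClen pl h64 1 (by norm_num)), pvChunkCol (pvC pl 2) 16 2 7 (by norm_num) (by norm_num) (pvClen pl h64 2 (by norm_num)), pvChunkCol (pvC pl 3) 24 3 7 (by norm_num) (by norm_num) (pvClen pl h64 3 (by norm_num)), pvChunkCol (pvC pl 4) 32 4 7 (by norm_num) (by norm_num) (pvClen pl h64 4 (by norm_num)), pvChunkCol (pvC pl 5) 40 5 7 (by norm_num) (by norm_num) (pvClen pl h64 5 (by norm_num)), pvChunkCol (pvC pl 6) 48 6 7 (by norm_num) (by norm_num) (pvClen pl h64 6 (by norm_num)), pvChunkCol (pvC pl 7) 56 7 7 (by norm_num) (by norm_num) (pvClen pl h64 7 (by norm_num))]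
    simp
  rw [show List.range 8 = [0,1,2,3,4,5,6,7] from rfl]
  simp only [List.map_cons, List.map_nil, List.cons_append, List.nil_append,
    List.flatten_cons, List.flatten_nil]
  simp only [hrow0, hrow1, hrow2, hrow3, hrow4, hrow5, hrow6, hrow7,
    hcol0, hcol1, hcol2, hcol3, hcol4, hcol5, hcol6, hcol7]
  rw [show PySem.List.pyRange 0 64 8 = [0, 8, 16, 24, 32, 40, 48, 56] from by decide]
  rw [show PySem.List.pyRange 0 8 1 = [0, 1, 2, 3, 4, 5, 6, 7] from by decide]
  simp only [List.map_cons, List.map_nil, Int.reduceAdd]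
  have hs0 : PySem.List.slice pl (some 0) (some 8) = pvC pl 0 := by
    rw [PySem.List.slice_toNat _ (by norm_num) (by norm_num)]; rfl
  have hs1 : PySem.List.slice pl (some 8) (some 16) = pvC pl 1 := by
    rw [PySem.List.slice_toNat _ (by norm_num) (by norm_num)]; rfl
  have hs2 : PySem.List.slice pl (some 16) (some 24) = pvC pl 2 := by
    rw [PySem.List.slice_toNat _ (by norm_num) (by norm_num)]; rfl
  have hs3 : PySem.List.slice pl (some 24) (some 32) = pvC pl 3 := by
    rw [PySem.List.slice_toNat _ (by norm_num) (by norm_num)]; rfl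
  have hs4 : PySem.List.slice pl (some 32) (some 40) = pvC pl 4 := by
    rw [PySem.List.slice_toNat _ (by norm_num) (by norm_num)]; rfl
  have hs5 : PySem.List.slice pl (some 40) (some 48) = pvC pl 5 := by
    rw [PySem.List.slice_toNat _ (by norm_num) (by norm_num)]; rfl
  have hs6 : PySem.List.slice pl (some 48) (some 56) = pvC pl 6 := by
    rw [PySem.List.slice_toNat _ (by norm_num) (by norm_num)]; rfl
  have hs7 : PySem.List.slice pl (some 56) (some 64) = pvC pl 7 := by
    rw [PySem.List.slice_toNat _ (by norm_num) (by norm_num)]; rfl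
  simp only [hs0, hs1, hs2, hs3, hs4, hs5, hs6, hs7]
  simp only [List.foldl_cons, List.foldl_nil, List.nil_append]
  rw [show PySem.List.pyGetD [pvC pl 0, pvC pl 1, pvC pl 2, pvC pl 3, pvC pl 4, pvC pl 5, pvC pl 6, pvC pl 7] 0 [] = pvC pl 0 from rfl]
  rw [show PySem.List.pyGetD [pvC pl 0, pvC pl 1, pvC pl 2, pvC pl 3, pvC pl 4, pvC pl 5, pvC pl 6, pvC pl 7] 1 [] = pvC pl 1 from rfl]
  rw [show PySem.List.pyGetD [pvC pl 0, pvC pl 1, pvC pl 2, pvC pl 3, pvC pl 4, pvC pl 5, pvC pl 6, pvC pl 7] 2 [] = pvC pl 2 from rfl]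
  rw [show PySem.List.pyGetD [pvC pl 0, pvC pl 1, pvC pl 2, pvC pl 3, pvC pl 4, pvC pl 5, pvC pl 6, pvC pl 7] 3 [] = pvC pl 3 from rfl]
  rw [show PySem.List.pyGetD [pvC pl 0, pvC pl 1, pvC pl 2, pvC pl 3, pvC pl 4, pvC pl 5, pvC pl 6, pvC pl 7] 4 [] = pvC pl 4 from rfl]
  rw [show PySem.List.pyGetD [pvC pl 0, pvC pl 1, pvC pl 2, pvC pl 3, pvC pl 4, pvC pl 5, pvC pl 6, pvC pl 7] 5 [] = pvC pl 5 from rfl]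
  rw [show PySem.List.pyGetD [pvC pl 0, pvC pl 1, pvC pl 2, pvC pl 3, pvC pl 4, pvC pl 5, pvC pl 6, pvC pl 7] 6 [] = pvC pl 6 from rfl]
  rw [show PySem.List.pyGetD [pvC pl 0, pvC pl 1, pvC pl 2, pvC pl 3, pvC pl 4, pvC pl 5, pvC pl 6, pvC pl 7] 7 [] = pvC pl 7 from rfl]
  simp only [PySem.List.pyGetD_ofNat']
  simp only [pvOnesCast]
  simp only [pvCell]
  simp only [List.map_cons, List.map_nil, List.append_assoc, List.append_nil]
  rfl

-- ===== VERDICT (by name: the statement is the Claim_ definition above) =====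
theorem calculate_2d_parity_spec : Claim_equal_calculate_2d_parity := by
  intro text _
  unfold Spec_calculate_2d_parity
  simp only [calculate_2d_parity, calculate_2d_parity_alt]
  exact pvMain (pvLjust text.toList) (by simp [pvLjust]; omega)
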